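-- pv_equiv track=rewrite | github.com/armaantayal/Armaan-Tayal---1024230087---Python-Programming---URA302 | PYTHON WORKSHEET 3.py | is_final_position_reached
-- ===== SOURCE A (Python) =====
-- def is_final_position_reached(path):
--     x, y = 0, 0
--     for move in path:
--         if move == "up":
--             y += 1
--         elif move == "down":
--             y -= 1
--         elif move == "left":
--             x -= 1
--         elif move == "right":
--             x += 1
--     return x == 2 and y == 0
-- ===== SOURCE B (Python) =====
-- DELTAS = {"up": (0, 1), "down": (0, -1), "left": (-1, 0), "right": (1, 0)}
--
-- def _disp(path):
--     # divide and conquer: displacement of a path = sum of displacements of its halves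
--     n = len(path)
--     if n == 0:
--         return (0, 0)
--     if n == 1:
--         return DELTAS.get(path[0], (0, 0))
--     mid = n // 2
--     lx, ly = _disp(path[:mid])
--     rx, ry = _disp(path[mid:])
--     return (lx + rx, ly + ry)
--
-- def is_final_position_reached(path):
--     x, y = _disp(list(path))
--     return x == 2 and y == 0
-- ===== Notes on version B (the rewrite author's own statement) =====
-- stated objective: alternative
-- what changed: Replaces A's linear if/elif accumulator scan with a divide-and-conquer recursion: displacement is a monoid sum, so the path is split in halves, each half's displacement computed recursively from a lookup table of per-move delta vectors, and the halves' displacements added.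
import Mathlib
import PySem

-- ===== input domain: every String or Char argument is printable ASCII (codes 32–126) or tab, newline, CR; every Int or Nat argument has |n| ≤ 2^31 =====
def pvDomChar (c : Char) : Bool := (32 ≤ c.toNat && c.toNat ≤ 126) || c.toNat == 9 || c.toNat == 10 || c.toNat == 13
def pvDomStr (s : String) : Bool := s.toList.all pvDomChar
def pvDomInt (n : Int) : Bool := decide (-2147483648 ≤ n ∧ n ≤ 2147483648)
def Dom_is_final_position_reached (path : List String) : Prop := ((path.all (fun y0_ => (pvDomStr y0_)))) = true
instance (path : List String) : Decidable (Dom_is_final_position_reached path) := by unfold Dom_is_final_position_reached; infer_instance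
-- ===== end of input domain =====

-- B replaces A's linear if/elif coordinate accumulator with a divide-and-conquer
-- recursion on path halves over a delta-vector lookup table (alternative decomposition).

-- ===== PORT A =====
def is_final_position_reached (path : List String) : Bool :=
  let p := path.foldl (fun (xy : Int × Int) move =>
    if move == "up" then (xy.1, xy.2 + 1)
    else if move == "down" then (xy.1, xy.2 - 1)
    else if move == "left" then (xy.1 - 1, xy.2)
    else if move == "right" then (xy.1 + 1, xy.2)
    else xy) ((0 : Int), (0 : Int))
  p.1 == 2 && p.2 == 0

-- ===== PORT B =====
-- DELTAS = {"up": (0,1), "down": (0,-1), "left": (-1,0), "right": (1,0)}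
def pvDELTAS : PySem.Dict String (Int × Int) :=
  ((((PySem.Dict.empty.insert "up" ((0 : Int), (1 : Int))).insert "down" (0, -1)).insert
      "left" (-1, 0)).insert "right" (1, 0))

-- _disp: divide and conquer; path[:mid] / path[mid:] with 0 ≤ mid ≤ len are List.take/drop.
def pvDisp (path : List String) : Int × Int :=
  let n := path.length
  if n = 0 then (0, 0)
  else if n = 1 then
    match PySem.List.pyGet? path 0 with
    | some m => pvDELTAS.getD m (0, 0)
    | none => (0, 0)  -- unreachable: n = 1
  else
    let mid := n / 2
    let l := pvDisp (path.take mid)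
    let r := pvDisp (path.drop mid)
    (l.1 + r.1, l.2 + r.2)
termination_by path.length
decreasing_by
  · simp [List.length_take]; omega
  · simp [List.length_drop]; omega

def is_final_position_reached_alt (path : List String) : Bool :=
  let p := pvDisp path
  p.1 == 2 && p.2 == 0

-- ===== PRECONDITION & SPEC =====
def Spec_is_final_position_reached (path : List String) (out : Bool) : Prop := out = is_final_position_reached_alt path
instance (path : List String) (out : Bool) : Decidable (Spec_is_final_position_reached path out) := by unfold Spec_is_final_position_reached; infer_instance

-- ===== CLAIM (what is proved, stated in full; the proofs are below) =====
def Claim_equal_is_final_position_reached : Prop := ∀ (path : List String), Dom_is_final_position_reached path → Spec_is_final_position_reached path (is_final_position_reached path)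

-- ===== LEMMAS AND PROOFS =====

-- A's fold computes (right-count − left-count, up-count − down-count), shifted by the start state.
theorem foldA_eq_counts (l : List String) (x y : Int) :
    l.foldl (fun (xy : Int × Int) move =>
      if move == "up" then (xy.1, xy.2 + 1)
      else if move == "down" then (xy.1, xy.2 - 1)
      else if move == "left" then (xy.1 - 1, xy.2)
      else if move == "right" then (xy.1 + 1, xy.2)
      else xy) (x, y)
    = (x + l.count "right" - l.count "left", y + l.count "up" - l.count "down") := by
  induction l generalizing x y with
  | nil => simp
  | cons m rest ih =>
    simp only [List.foldl_cons]
    split_ifs <;> simp_all <;> omega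

-- B's divide-and-conquer displacement computes the same count differences.
theorem disp_eq_counts_aux (n : Nat) : ∀ (path : List String), path.length ≤ n →
    pvDisp path = ((path.count "right" : Int) - path.count "left",
                   (path.count "up" : Int) - path.count "down") := by
  induction n with
  | zero =>
    intro path h
    have : path = [] := List.length_eq_zero_iff.mp (Nat.le_zero.mp h)
    subst this; simp [pvDisp]
  | succ n ih =>
    intro path h
    rw [pvDisp]
    by_cases h0 : path.length = 0
    · have : path = [] := List.length_eq_zero_iff.mp h0
      subst this; simp
    · by_cases h1 : path.length = 1
      · obtain ⟨m, hm⟩ := List.length_eq_one_iff.mp h1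
        subst hm
        simp only [if_neg h0, if_pos h1]
        simp only [PySem.List.pyGet?, PySem.List.pyIdx?, pvDELTAS, PySem.Dict.getD_insert]
        simp only [List.length_singleton, List.count_cons, List.count_nil]
        split_ifs <;>
          simp_all [PySem.Dict.getD, PySem.Dict.get?, PySem.Dict.empty]
      · simp only [if_neg h0, if_neg h1]
        have h2 : 2 ≤ path.length := by omega
        have htl : (path.take (path.length / 2)).length ≤ n := by
          simp [List.length_take]; omega
        have hdl : (path.drop (path.length / 2)).length ≤ n := by
          simp [List.length_drop]; omega
        rw [ih _ htl, ih _ hdl]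
        have hc : ∀ s : String, (path.take (path.length / 2)).count s
            + (path.drop (path.length / 2)).count s = path.count s := fun s => by
          rw [← List.count_append, List.take_append_drop]
        simp only [Prod.mk.injEq]
        refine ⟨?_, ?_⟩
        · rw [← hc "right", ← hc "left"]; push_cast; ring
        · rw [← hc "up", ← hc "down"]; push_cast; ring

theorem disp_eq_counts (path : List String) :
    pvDisp path = ((path.count "right" : Int) - path.count "left",
                   (path.count "up" : Int) - path.count "down") :=
  disp_eq_counts_aux path.length path le_rfl

-- ===== VERDICT (by name: the statement is the Claim_ definition above) =====
theorem is_final_position_reached_spec : Claim_equal_is_final_position_reached := by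
  intro path _
  unfold Spec_is_final_position_reached is_final_position_reached is_final_position_reached_alt
  rw [disp_eq_counts, foldA_eq_counts]
  simp
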